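-- pv_equiv track=rewrite | github.com/aieng-lab/transformer-math-pretraining | src/pretraining_methods/mlm_like/SBO/prepare.py | get_span_boundaries
-- ===== SOURCE A (Python) =====
-- def get_span_boundaries(span_positions):
--     boundary_dict = {}
--
--     for i, position in enumerate(span_positions):
--         boundary_dict[position] = {}
--         sub = 1
--         current = position
--         while i - sub >= 0:
--             previous = span_positions[i - sub]
--             if previous == current - 1:
--                 current = previous
--             else:
--                 # current does not belong to span anymore
--                 boundary_dict[position]["left"] = current - 1
--                 break
--             sub += 1
--         if "left" not in boundary_dict.get(position):
--             boundary_dict[position]["left"] = current - 1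
--
--         add = 1
--         current = position
--         while i + add < len(span_positions):
--             next = span_positions[i + add]
--             if next == current + 1:
--                 current = next
--             else:
--                 # current does not belong to span anymore
--                 boundary_dict[position]["right"] = current + 1
--                 break
--             add += 1
--         if "right" not in boundary_dict.get(position):
--             boundary_dict[position]["right"] = current + 1
--
--     return boundary_dict
-- ===== SOURCE B (Python) =====
-- def get_span_boundaries(span_positions):
--     n = len(span_positions)
--     # one forward pass: left boundary of the run each index belongs to
--     left = [0] * n
--     for i in range(n):
--         if i > 0 and span_positions[i] == span_positions[i - 1] + 1:
--             left[i] = left[i - 1]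
--         else:
--             left[i] = span_positions[i] - 1
--     # one backward pass: right boundary of the run each index belongs to
--     right = [0] * n
--     for i in range(n - 1, -1, -1):
--         if i + 1 < n and span_positions[i + 1] == span_positions[i] + 1:
--             right[i] = right[i + 1]
--         else:
--             right[i] = span_positions[i] + 1
--     return {p: {"left": left[i], "right": right[i]} for i, p in enumerate(span_positions)}
-- ===== Notes on version B (the rewrite author's own statement) =====
-- stated objective: alternative
-- what changed: Replaced the per-position leftward/rightward rescans with two linear dynamic-programming passes (left boundaries forward, right boundaries backward), then a single dict comprehension.
import Mathlib
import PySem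

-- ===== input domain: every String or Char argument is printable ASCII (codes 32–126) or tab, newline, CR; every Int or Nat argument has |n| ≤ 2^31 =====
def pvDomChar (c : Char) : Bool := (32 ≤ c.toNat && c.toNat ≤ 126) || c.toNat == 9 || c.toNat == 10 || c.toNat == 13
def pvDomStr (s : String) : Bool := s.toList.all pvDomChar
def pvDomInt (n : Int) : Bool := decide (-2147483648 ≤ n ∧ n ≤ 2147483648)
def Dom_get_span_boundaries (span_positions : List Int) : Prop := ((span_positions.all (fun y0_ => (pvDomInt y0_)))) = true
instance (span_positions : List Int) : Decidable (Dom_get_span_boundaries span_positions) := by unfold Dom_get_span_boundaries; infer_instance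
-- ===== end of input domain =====

-- B computes the boundaries by two dynamic-programming passes (left forward, right backward)
-- instead of A's per-position rescans; same return value everywhere.

-- ===== PORT A =====
-- the inner while loop walking left from index i (sub = 1, 2, …): argument j is the count of
-- indices still to the left (the next index inspected is j - 1); returns the final `current`.
-- Python assigns `left` as `current - 1` both at the break and after the loop, so one return value covers both.
def leftScanA (xs : List Int) : Nat → Int → Int
  | 0, cur => cur
  | j + 1, cur =>
    let previous := PySem.List.pyGetD xs (j : Int) 0   -- xs[i - sub], always in range here
    if previous = cur - 1 then leftScanA xs j previous else cur

-- the inner while loop walking right: j = i + add; returns the final `current`.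
def rightScanA (xs : List Int) (j : Nat) (cur : Int) : Int :=
  if j < xs.length then
    let next := PySem.List.pyGetD xs (j : Int) 0       -- xs[i + add], in range by the guard
    if next = cur + 1 then rightScanA xs (j + 1) next else cur
  else cur
termination_by xs.length - j

def get_span_boundaries (span_positions : List Int) : List (Int × List (String × Int)) :=
  ((PySem.List.enumerate span_positions).foldl
    (fun d p =>
      let i := p.1.toNat          -- enumerate index, nonnegative
      let position := p.2
      let inner : PySem.Dict String Int := PySem.Dict.empty     -- boundary_dict[position] = {}
      let inner := inner.insert "left" (leftScanA span_positions i position - 1)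
      let inner := inner.insert "right" (rightScanA span_positions (i + 1) position + 1)
      d.insert position inner)
    (PySem.Dict.empty : PySem.Dict Int (PySem.Dict String Int))).items.map
    (fun q => (q.1, q.2.items))

-- ===== PORT B =====
-- forward DP pass: left[i] = left[i-1] if span_positions[i] == span_positions[i-1] + 1 else span_positions[i] - 1
-- (the Python array memoization is ported as recursion on the index; each step is the loop body verbatim)
def leftValB (xs : List Int) : Nat → Int
  | 0 => xs.getD 0 0 - 1
  | i + 1 => if xs.getD (i + 1) 0 = xs.getD i 0 + 1 then leftValB xs i else xs.getD (i + 1) 0 - 1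

-- backward DP pass: right[i] = right[i+1] if i+1 < n and span_positions[i+1] == span_positions[i] + 1 else span_positions[i] + 1
def rightValB (xs : List Int) (i : Nat) : Int :=
  if h : i + 1 < xs.length ∧ xs.getD (i + 1) 0 = xs.getD i 0 + 1 then rightValB xs (i + 1)
  else xs.getD i 0 + 1
termination_by xs.length - i
decreasing_by omega

def get_span_boundaries_alt (span_positions : List Int) : List (Int × List (String × Int)) :=
  let n := span_positions.length
  let left := (List.range n).map (leftValB span_positions)
  let right := (List.range n).map (rightValB span_positions)
  ((PySem.List.enumerate span_positions).foldl
    (fun d p =>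
      d.insert p.2 (PySem.Dict.mk [("left", left.getD p.1.toNat 0), ("right", right.getD p.1.toNat 0)]))
    (PySem.Dict.empty : PySem.Dict Int (PySem.Dict String Int))).items.map
    (fun q => (q.1, q.2.items))

-- ===== PRECONDITION & SPEC =====
def Spec_get_span_boundaries (span_positions : List Int) (out : List (Int × List (String × Int))) : Prop := out = get_span_boundaries_alt span_positions
instance (span_positions : List Int) (out : List (Int × List (String × Int))) : Decidable (Spec_get_span_boundaries span_positions out) := by unfold Spec_get_span_boundaries; infer_instance

-- ===== CLAIM (what is proved, stated in full; the proofs are below) =====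
def Claim_equal_get_span_boundaries : Prop := ∀ (span_positions : List Int), Dom_get_span_boundaries span_positions → Spec_get_span_boundaries span_positions (get_span_boundaries span_positions)

-- ===== LEMMAS AND PROOFS =====

theorem leftScanA_eq (xs : List Int) : ∀ i : Nat, i < xs.length →
    leftScanA xs i (xs.getD i 0) = leftValB xs i + 1 := by
  intro i
  induction i with
  | zero => intro _; simp [leftScanA, leftValB]
  | succ i ih =>
    intro h
    simp only [leftScanA, leftValB, PySem.List.pyGetD_natCast]
    by_cases hc : xs.getD i 0 = xs.getD (i + 1) 0 - 1
    · rw [if_pos hc, if_pos (by omega), ih (by omega)]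
    · rw [if_neg hc, if_neg (by omega)]; omega

theorem rightScanA_eq (xs : List Int) : ∀ k i : Nat, xs.length - i ≤ k → i < xs.length →
    rightScanA xs (i + 1) (xs.getD i 0) = rightValB xs i - 1 := by
  intro k
  induction k with
  | zero => intro i hk hi; omega
  | succ k ih =>
    intro i hk hi
    rw [rightScanA, rightValB]
    by_cases h1 : i + 1 < xs.length
    · rw [if_pos h1]
      simp only [PySem.List.pyGetD_natCast]
      by_cases h2 : xs.getD (i + 1) 0 = xs.getD i 0 + 1
      · rw [if_pos h2, dif_pos ⟨h1, h2⟩, ← ih (i + 1) (by omega) h1, h2]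
      · rw [if_neg h2, dif_neg (by tauto)]; omega
    · rw [if_neg h1, dif_neg (by tauto)]; omega

theorem mem_enumerate_fact (xs : List Int) : ∀ (s : Int) q, q ∈ PySem.List.enumerate xs s →
    s ≤ q.1 ∧ (q.1 - s).toNat < xs.length ∧ xs.getD (q.1 - s).toNat 0 = q.2 := by
  induction xs with
  | nil => intro s q h; simp [PySem.List.enumerate_nil] at h
  | cons x rest ih =>
    intro s q h
    rw [PySem.List.enumerate_cons] at h
    rcases List.mem_cons.mp h with h | h
    · subst h; simp
    · obtain ⟨h1, h2, h3⟩ := ih (s + 1) q h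
      refine ⟨by omega, ?_, ?_⟩
      · simp only [List.length_cons]; omega
      · have : (q.1 - s).toNat = (q.1 - (s + 1)).toNat + 1 := by omega
        rw [this]; simpa using h3

-- ===== VERDICT (by name: the statement is the Claim_ definition above) =====
theorem get_span_boundaries_spec : Claim_equal_get_span_boundaries := by
  intro xs _
  unfold Spec_get_span_boundaries get_span_boundaries get_span_boundaries_alt
  congr 1
  congr 1
  apply PySem.List.foldl_congr_mem
  intro d p hp
  obtain ⟨h1, h2, h3⟩ := mem_enumerate_fact xs 0 p hp
  simp only [Int.sub_zero] at h2 h3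
  have hl : ((List.range xs.length).map (leftValB xs)).getD p.1.toNat 0 = leftValB xs p.1.toNat := by
    rw [List.getD_eq_getElem?_getD, List.getElem?_map, List.getElem?_range h2]; rfl
  have hr : ((List.range xs.length).map (rightValB xs)).getD p.1.toNat 0 = rightValB xs p.1.toNat := by
    rw [List.getD_eq_getElem?_getD, List.getElem?_map, List.getElem?_range h2]; rfl
  dsimp only
  rw [hl, hr, ← h3, leftScanA_eq xs p.1.toNat h2, rightScanA_eq xs xs.length p.1.toNat (by omega) h2]
  congr 1
  have : leftValB xs p.1.toNat + 1 - 1 = leftValB xs p.1.toNat := by omega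
  have h2' : rightValB xs p.1.toNat - 1 + 1 = rightValB xs p.1.toNat := by omega
  rw [this, h2']
  rfl
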